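-- pv_equiv track=rewrite | github.com/wherby/code | contest/00000c361d112/c382/q3/t3.py | flowerGame
-- ===== SOURCE A (Python) =====
-- def flowerGame(n: int, m: int) -> int:
--     cnt = 0
--     for i in range(1,n+1):
--         if i%2==0:
--             cnt += (m+1)//2
--         else:
--             cnt += (m)//2
--     return cnt
-- ===== SOURCE B (Python) =====
-- def flowerGame(n: int, m: int) -> int:
--     return (max(n, 0) * m) // 2
-- ===== Notes on version B (the rewrite author's own statement) =====
-- stated objective: faster
-- what changed: Replaces A's O(n) parity loop over i=1..n with the closed form (max(n,0)*m)//2, using floor((k even ? m+1 : m)/2) summation identity.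
import Mathlib
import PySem

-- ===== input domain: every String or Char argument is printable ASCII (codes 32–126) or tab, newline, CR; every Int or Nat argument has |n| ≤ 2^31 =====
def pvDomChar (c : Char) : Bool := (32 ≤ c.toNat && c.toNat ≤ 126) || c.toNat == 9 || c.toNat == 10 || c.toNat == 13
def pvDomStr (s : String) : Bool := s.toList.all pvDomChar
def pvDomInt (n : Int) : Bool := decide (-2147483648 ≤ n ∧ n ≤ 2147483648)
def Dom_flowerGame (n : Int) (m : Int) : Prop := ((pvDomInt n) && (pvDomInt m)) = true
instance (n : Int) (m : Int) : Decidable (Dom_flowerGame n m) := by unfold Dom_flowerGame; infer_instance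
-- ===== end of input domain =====

-- B replaces A's parity loop over 1..n by the closed form (max(n,0)*m)//2 (objective: faster, O(1) vs O(n)).

-- ===== PORT A =====
def flowerGame (n : Int) (m : Int) : Int :=
  (PySem.List.pyRange 1 (n + 1) 1).foldl
    (fun cnt i =>
      if PySem.Int.mod i 2 == 0 then cnt + PySem.Int.floordiv (m + 1) 2
      else cnt + PySem.Int.floordiv m 2)
    0

-- ===== PORT B =====
def flowerGame_alt (n : Int) (m : Int) : Int :=
  PySem.Int.floordiv (max n 0 * m) 2

-- ===== PRECONDITION & SPEC =====
def Spec_flowerGame (n : Int) (m : Int) (out : Int) : Prop := out = flowerGame_alt n m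
instance (n : Int) (m : Int) (out : Int) : Decidable (Spec_flowerGame n m out) := by unfold Spec_flowerGame; infer_instance

-- ===== CLAIM (what is proved, stated in full; the proofs are below) =====
def Claim_equal_flowerGame : Prop := ∀ (n : Int) (m : Int), Dom_flowerGame n m → Spec_flowerGame n m (flowerGame n m)

-- ===== LEMMAS AND PROOFS =====

-- A's loop from 1 to k sums to floor(k*m/2), by induction on k.
theorem flowerGame_loop (m : Int) (k : Nat) :
    (PySem.List.pyRange 1 ((k : Int) + 1) 1).foldl
      (fun cnt i =>
        if PySem.Int.mod i 2 == 0 then cnt + PySem.Int.floordiv (m + 1) 2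
        else cnt + PySem.Int.floordiv m 2)
      0 = PySem.Int.floordiv ((k : Int) * m) 2 := by
  induction k with
  | zero =>
      simp [PySem.List.pyRange_one_eq_nil, PySem.Int.floordiv]
  | succ k ih =>
      have hsplit : PySem.List.pyRange 1 ((k : Int) + 1 + 1) 1
          = PySem.List.pyRange 1 ((k : Int) + 1) 1 ++ [(k : Int) + 1] := by
        exact PySem.List.pyRange_one_succ_right (by omega)
      push_cast
      rw [hsplit, List.foldl_append, ih]
      simp only [List.foldl_cons, List.foldl_nil]
      simp only [PySem.Int.mod_eq_emod_of_pos (show (0:Int) < 2 by omega),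
          PySem.Int.floordiv_eq_ediv_of_pos (show (0:Int) < 2 by omega)]
      have hmul : ((k : Int) + 1) * m = (k : Int) * m + m := by ring
      have h1 : ((k : Int) * m) % 2 = ((k : Int) % 2) * (m % 2) % 2 := Int.mul_emod _ _ _
      have hk2 : (k : Int) % 2 = 0 ∨ (k : Int) % 2 = 1 := by omega
      have hm2 : m % 2 = 0 ∨ m % 2 = 1 := by omega
      by_cases h : ((k : Int) + 1) % 2 = 0 <;> simp [h] <;>
        rcases hk2 with hk2 | hk2 <;> rcases hm2 with h2 | h2 <;>
        rw [hk2, h2] at h1 <;> omega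

-- ===== VERDICT (by name: the statement is the Claim_ definition above) =====
theorem flowerGame_spec : Claim_equal_flowerGame := by
  unfold Claim_equal_flowerGame
  intro n m _
  unfold Spec_flowerGame flowerGame flowerGame_alt
  by_cases hn : n ≤ 0
  · rw [PySem.List.pyRange_one_eq_nil (by omega)]
    simp [show max n 0 = 0 from by omega, PySem.Int.floordiv]
  · rw [not_le] at hn
    have hk : n = ((n.toNat : Int)) := by omega
    rw [show max n 0 = n from by omega, hk]
    exact flowerGame_loop m n.toNat
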